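-- pv_equiv track=rewrite | github.com/pypi-data/pypi-mirror-335 | packages/ansys-scade-python-wrapper/ansys_scade_python_wrapper-2.2.3-py3-none-any.whl/ansys/scade/python_wrapper/utils.py | tokenize_name
-- ===== SOURCE A (Python) =====
-- from typing import List
--
-- def tokenize_name(fullname: str) -> List[str]:
--     """Return the tokens of a word."""
--     tokens = []
--     for name in fullname.split('_'):
--         # there must be a more clever algorithm, one pass
--         # for now, adapt an existing one
--         if not name:
--             tokens.append('')
--             continue
--         prev = name[0]
--         lower = prev
--         for c in name[1:]:
--             if c.isupper() and prev != '_':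
--                 lower += '_'
--             prev = c
--             lower += c
--         lst = lower.split('_')
--         # merge successive uppercase singletons
--         prev = lst[0]
--         for token in lst[1:]:
--             if prev.isupper() and len(token) == 1 and token.isupper():
--                 prev += token
--             else:
--                 tokens.append(prev)
--                 prev = token
--         tokens.append(prev)
--     return tokens
-- ===== SOURCE B (Python) =====
-- def tokenize_name(fullname):
--     """Return the tokens of a word (single pass with one-char lookahead)."""
--     tokens = []
--     cur = ''
--     n = len(fullname)
--     for i in range(n):
--         c = fullname[i]
--         if c == '_':
--             tokens.append(cur)
--             cur = ''
--         elif c.isupper() and cur: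
--             nxt = fullname[i + 1] if i + 1 < n else None
--             if cur.isupper() and (nxt is None or nxt == '_' or nxt.isupper()):
--                 cur += c
--             else:
--                 tokens.append(cur)
--                 cur = c
--         else:
--             cur += c
--     tokens.append(cur)
--     return tokens
-- ===== Notes on version B (the rewrite author's own statement) =====
-- stated objective: simpler
-- what changed: A splits on '_', rebuilds each part with '_' inserted before uppercase letters, splits again and then merges uppercase singletons in a fourth pass; B is a single left-to-right pass over the string with a one-character lookahead that flushes on '_' and decides merge-vs-new-token on the fly.
import Mathlib
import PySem

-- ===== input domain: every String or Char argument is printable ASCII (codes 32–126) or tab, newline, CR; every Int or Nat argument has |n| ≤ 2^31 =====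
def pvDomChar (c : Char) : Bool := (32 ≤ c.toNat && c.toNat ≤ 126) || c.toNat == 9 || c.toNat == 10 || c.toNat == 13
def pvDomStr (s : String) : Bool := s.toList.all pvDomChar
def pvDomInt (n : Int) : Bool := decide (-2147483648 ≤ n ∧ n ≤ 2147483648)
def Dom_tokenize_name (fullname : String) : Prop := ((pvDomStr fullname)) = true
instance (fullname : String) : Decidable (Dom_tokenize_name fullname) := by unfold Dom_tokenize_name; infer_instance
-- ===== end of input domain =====

-- B is a single left-to-right pass with one-char lookahead instead of A's split/rebuild/split/merge
-- per part (objective: simpler); return values proved equal on all of Dom.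

-- ===== PORT A =====

-- str.isupper() ported by hand (PySem has only the char-level isupper): Python's rule is
-- "at least one cased character and no lowercase cased character"; on the ASCII domain the
-- cased characters are exactly the letters, so this is exact there.
def pvStrIsupper (cs : List Char) : Bool :=
  cs.any (fun c => PySem.Chars.isalpha c) && cs.all (fun c => !PySem.Chars.islower c)

-- the inner "for c in name[1:]" loop building `lower` (prev carried along, '_' inserted before uppers)
def pvLowerA (prev : Char) (rest : List Char) : List Char :=
  match rest with
  | [] => []
  | c :: t => (if PySem.Chars.isupper c && !(prev == '_') then ['_', c] else [c]) ++ pvLowerA c t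

-- the "merge successive uppercase singletons" loop (prev = accumulator, tokens = output so far)
def pvMergeA (prev : List Char) (rest : List (List Char)) (tokens : List (List Char)) :
    List (List Char) :=
  match rest with
  | [] => tokens ++ [prev]
  | token :: t =>
    if pvStrIsupper prev && token.length == 1 && pvStrIsupper token then
      pvMergeA (prev ++ token) t tokens
    else
      pvMergeA token t (tokens ++ [prev])

-- one iteration of the outer "for name in fullname.split('_')" loop
def pvPartA (tokens : List (List Char)) (name : List Char) : List (List Char) :=
  match name with
  | [] => tokens ++ [[]]
  | c :: t =>
    match PySem.Chars.splitOn (c :: pvLowerA c t) ['_'] with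
    | [] => tokens            -- unreachable: str.split never returns an empty list
    | h :: rest => pvMergeA h rest tokens

def tokenize_name (fullname : String) : List String :=
  ((PySem.Chars.splitOn fullname.toList ['_']).foldl pvPartA []).map (fun cs => String.ofList cs)

-- ===== PORT B =====

-- "fullname[i+1] if i + 1 < n else None": the lookahead test nxt is None / '_' / uppercase
def pvLookB (t : List Char) : Bool :=
  match t with
  | [] => true
  | d :: _ => d == '_' || PySem.Chars.isupper d

-- the single pass of Source B: tokens = output so far, cur = current token buffer
def pvRunB (tokens : List (List Char)) (cur : List Char) (rest : List Char) :
    List (List Char) :=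
  match rest with
  | [] => tokens ++ [cur]
  | c :: t =>
    if c == '_' then
      pvRunB (tokens ++ [cur]) [] t
    else if PySem.Chars.isupper c && !cur.isEmpty then
      if pvStrIsupper cur && pvLookB t then
        pvRunB tokens (cur ++ [c]) t
      else
        pvRunB (tokens ++ [cur]) [c] t
    else
      pvRunB tokens (cur ++ [c]) t

def tokenize_name_alt (fullname : String) : List String :=
  (pvRunB [] [] fullname.toList).map (fun cs => String.ofList cs)

-- ===== PRECONDITION & SPEC =====
def Spec_tokenize_name (fullname : String) (out : List String) : Prop := out = tokenize_name_alt fullname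
instance (fullname : String) (out : List String) : Decidable (Spec_tokenize_name fullname out) := by unfold Spec_tokenize_name; infer_instance

-- ===== CLAIM (what is proved, stated in full; the proofs are below) =====
def Claim_equal_tokenize_name : Prop := ∀ (fullname : String), Dom_tokenize_name fullname → Spec_tokenize_name fullname (tokenize_name fullname)

-- ===== LEMMAS AND PROOFS =====

-- simple recursive characterisation of s.split('_')
def pvParts (cur : List Char) (l : List Char) : List (List Char) :=
  match l with
  | [] => [cur]
  | c :: t => if c == '_' then cur :: pvParts [] t else pvParts (cur ++ [c]) t

-- the uppercase-started segments of a '_'-free part, continuing segment `cur`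
def pvSegs (cur : List Char) (t : List Char) : List (List Char) :=
  match t with
  | [] => [cur]
  | c :: t' => if PySem.Chars.isupper c then cur :: pvSegs [c] t' else pvSegs (cur ++ [c]) t'

def pvMergeL (xs : List (List Char)) : List (List Char) :=
  match xs with
  | [] => []
  | h :: r => pvMergeA h r []

-- Source B's behaviour on a single '_'-free part
def pvTokB (cur : List Char) (t : List Char) : List (List Char) :=
  match t with
  | [] => [cur]
  | c :: t' =>
    if PySem.Chars.isupper c && !cur.isEmpty then
      if pvStrIsupper cur && pvLookB t' then pvTokB (cur ++ [c]) t'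
      else cur :: pvTokB [c] t'
    else pvTokB (cur ++ [c]) t'


-- a helper for B's lookahead: past the end of a '_'-free part it does not matter
-- whether the part is followed by '_' or by nothing
lemma pv_lookB_append (p t : List Char) : pvLookB (p ++ '_' :: t) = pvLookB p := by
  cases p <;> simp [pvLookB]

lemma pv_bne (c : Char) (h : ¬'_' = c) : (c == '_') = false := by
  simp; exact fun hh => h hh.symm

lemma pv_go_spec : ∀ (l : List Char) (fuel : Nat) (acc : List (List Char)) (cb : List Char),
    l.length ≤ fuel →
    PySem.Chars.splitOn.go ['_'] fuel l cb acc = acc.reverse ++ pvParts cb.reverse l := by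
  intro l
  induction l with
  | nil =>
    intro fuel acc cb _
    cases fuel <;> simp [PySem.Chars.splitOn.go, pvParts]
  | cons c t ih =>
    intro fuel acc cb h
    cases fuel with
    | zero => simp at h
    | succ n =>
      rw [PySem.Chars.splitOn.go]
      simp only [List.isPrefixOf, List.length_cons] at *
      by_cases hc : c = '_'
      · subst hc
        simp [ih n _ _ (by omega), pvParts]
      · simp [hc, ih n _ _ (by omega), pvParts]
        exact fun h' => absurd h'.symm hc

lemma pv_splitOn_eq (l : List Char) : PySem.Chars.splitOn l ['_'] = pvParts [] l := by
  rw [PySem.Chars.splitOn, pv_go_spec l (l.length + 1) [] [] (by omega)]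
  simp

lemma pv_mergeA_acc (rest : List (List Char)) :
    ∀ prev acc, pvMergeA prev rest acc = acc ++ pvMergeA prev rest [] := by
  induction rest with
  | nil => intro prev acc; simp [pvMergeA]
  | cons token t ih =>
    intro prev acc
    simp only [pvMergeA]
    split
    · exact ih _ _
    · rw [ih token (acc ++ [prev]), ih token ([] ++ [prev])]; simp

lemma pv_runB_acc (l : List Char) :
    ∀ tokens cur, pvRunB tokens cur l = tokens ++ pvRunB [] cur l := by
  induction l with
  | nil => intro tokens cur; simp [pvRunB]
  | cons c t ih =>
    intro tokens cur
    simp only [pvRunB]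
    split_ifs
    · rw [ih (tokens ++ [cur]) [], ih ([] ++ [cur]) []]; simp
    · exact ih tokens _
    · rw [ih (tokens ++ [cur]) [c], ih ([] ++ [cur]) [c]]; simp
    · exact ih tokens _

lemma pv_partA_acc (tokens : List (List Char)) (name : List Char) :
    pvPartA tokens name = tokens ++ pvPartA [] name := by
  cases name with
  | nil => simp [pvPartA]
  | cons c t =>
    simp only [pvPartA]
    cases PySem.Chars.splitOn (c :: pvLowerA c t) ['_'] with
    | nil => simp
    | cons h rest => exact pv_mergeA_acc rest h tokens

lemma pv_foldl_partA (parts : List (List Char)) :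
    ∀ init, parts.foldl pvPartA init = init ++ parts.flatMap (pvPartA []) := by
  induction parts with
  | nil => intro init; simp
  | cons p ps ih =>
    intro init
    rw [List.foldl_cons, ih, pv_partA_acc, List.flatMap_cons, List.append_assoc]

lemma pv_parts_no_us (p : List Char) :
    ∀ cur, '_' ∉ p → pvParts cur p = [cur ++ p] := by
  induction p with
  | nil => intro cur _; simp [pvParts]
  | cons c t ih =>
    intro cur h
    simp only [List.mem_cons, not_or] at h
    simp [pvParts, (pv_bne c h.1), ih (cur ++ [c]) h.2]

lemma pv_parts_split (p : List Char) :
    ∀ cur t, '_' ∉ p → pvParts cur (p ++ '_' :: t) = (cur ++ p) :: pvParts [] t := by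
  induction p with
  | nil => intro cur t _; simp [pvParts]
  | cons c p' ih =>
    intro cur t h
    simp only [List.mem_cons, not_or] at h
    simp [pvParts, (pv_bne c h.1), ih (cur ++ [c]) t h.2]

lemma pv_upper_not_lower (c : Char) (h : PySem.Chars.isupper c = true) :
    PySem.Chars.islower c = false := by
  simp [PySem.Chars.isupper] at h
  simp [PySem.Chars.islower]
  intro hle
  exact absurd (le_trans hle h.2) (by decide)

lemma pv_strIsupper_singleton (c : Char) (h : PySem.Chars.isupper c = true) :
    pvStrIsupper [c] = true := by
  simp [pvStrIsupper, PySem.Chars.isalpha, h, pv_upper_not_lower c h]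

lemma pv_segs_head (t : List Char) :
    ∀ cur, ∃ s rest, pvSegs cur t = (cur ++ s) :: rest := by
  induction t with
  | nil => intro cur; exact ⟨[], [], by simp [pvSegs]⟩
  | cons c t' ih =>
    intro cur
    by_cases hup : PySem.Chars.isupper c = true
    · exact ⟨[], pvSegs [c] t', by simp [pvSegs, hup]⟩
    · obtain ⟨s, rest, hsr⟩ := ih (cur ++ [c])
      exact ⟨[c] ++ s, rest, by simp [pvSegs, hup]; simpa using hsr⟩

lemma pv_lowerA_parts (t : List Char) :
    ∀ prev cur, '_' ∉ t → (prev == '_') = false →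
      pvParts cur (pvLowerA prev t) = pvSegs cur t := by
  induction t with
  | nil => intro prev cur _ _; simp [pvLowerA, pvParts, pvSegs]
  | cons c t' ih =>
    intro prev cur h hprev
    simp only [List.mem_cons, not_or] at h
    have hc : (c == '_') = false := pv_bne c h.1
    by_cases hup : PySem.Chars.isupper c = true
    · simp only [pvLowerA, hup, hprev, Bool.not_false, Bool.and_true]
      simp [pvParts, pvSegs, hup, hc, ih c [c] h.2 hc]
    · simp only [pvLowerA, Bool.and_eq_true]
      rw [if_neg (by simp [hup])]
      simp [pvParts, pvSegs, hup, hc, ih c (cur ++ [c]) h.2 hc]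

lemma pv_mergeA_cons_true (prev h : List Char) (r : List (List Char))
    (hc : (pvStrIsupper prev && h.length == 1 && pvStrIsupper h) = true) :
    pvMergeA prev (h :: r) [] = pvMergeA (prev ++ h) r [] := by
  simp only [pvMergeA, hc, if_true]

lemma pv_mergeA_cons_false (prev h : List Char) (r : List (List Char))
    (hc : (pvStrIsupper prev && h.length == 1 && pvStrIsupper h) = false) :
    pvMergeA prev (h :: r) [] = prev :: pvMergeA h r [] := by
  simp only [pvMergeA, hc, Bool.false_eq_true, if_false]
  rw [pv_mergeA_acc r h ([] ++ [prev])]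
  simp

lemma pv_tokB_merge (t : List Char) :
    ∀ cur, cur ≠ [] → '_' ∉ t → pvTokB cur t = pvMergeL (pvSegs cur t) := by
  induction t with
  | nil => intro cur _ _; simp [pvTokB, pvSegs, pvMergeL, pvMergeA]
  | cons c t' ih =>
    intro cur hcur hus
    simp only [List.mem_cons, not_or] at hus
    have hne : (!cur.isEmpty) = true := by simp [hcur]
    by_cases hup : PySem.Chars.isupper c = true
    case neg =>
      have hseg : pvSegs cur (c :: t') = pvSegs (cur ++ [c]) t' := by simp [pvSegs, hup]
      have htok : pvTokB cur (c :: t') = pvTokB (cur ++ [c]) t' := by simp [pvTokB, hup]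
      rw [htok, hseg]
      exact ih _ (by simp) hus.2
    case pos =>
    have hseg : pvSegs cur (c :: t') = cur :: pvSegs [c] t' := by simp [pvSegs, hup]
    have htok0 : pvTokB cur (c :: t') =
        if pvStrIsupper cur && pvLookB t' then pvTokB (cur ++ [c]) t'
        else cur :: pvTokB [c] t' := by
      simp [pvTokB, hup, hne]
    rw [htok0, hseg]
    by_cases hm : (pvStrIsupper cur && pvLookB t') = true
    · rw [if_pos hm]
      simp only [Bool.and_eq_true] at hm
      have hc1 : (pvStrIsupper cur && [c].length == 1 && pvStrIsupper [c]) = true := by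
        simp [hm.1, pv_strIsupper_singleton c hup]
      cases t' with
      | nil =>
        rw [show pvSegs [c] ([] : List Char) = [[c]] from rfl,
          show pvMergeL (cur :: [[c]]) = pvMergeA cur [[c]] [] from rfl,
          pv_mergeA_cons_true cur [c] [] hc1]
        rfl
      | cons d t'' =>
        have hd : PySem.Chars.isupper d = true := by
          cases h' : PySem.Chars.isupper d
          · exfalso
            have h2 := hm.2
            simp [pvLookB, h'] at h2
            exact hus.2 (by simp [h2])
          · rfl
        have hstep : pvSegs [c] (d :: t'') = [c] :: pvSegs [d] t'' := by simp [pvSegs, hd]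
        rw [hstep,
          show pvMergeL (cur :: [c] :: pvSegs [d] t'') =
            pvMergeA cur ([c] :: pvSegs [d] t'') [] from rfl,
          pv_mergeA_cons_true cur [c] _ hc1,
          ih (cur ++ [c]) (by simp) hus.2,
          show pvSegs (cur ++ [c]) (d :: t'') = (cur ++ [c]) :: pvSegs [d] t'' by
            simp [pvSegs, hd]]
        rfl
    · rw [if_neg hm, ih [c] (by simp) hus.2]
      rcases pv_segs_head t' [c] with ⟨s, rest, hsr⟩
      have hsr' : pvSegs [c] t' = (c :: s) :: rest := by simpa using hsr
      have hcond : (pvStrIsupper cur && (c :: s).length == 1 && pvStrIsupper (c :: s)) = false := by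
        cases hcu : pvStrIsupper cur
        · simp
        · have hlk : pvLookB t' = false := by
            cases h' : pvLookB t'
            · rfl
            · exact absurd (by simp [hcu, h']) hm
          cases t' with
          | nil => simp [pvLookB] at hlk
          | cons d t'' =>
            have hdup : PySem.Chars.isupper d = false := by
              cases h' : PySem.Chars.isupper d
              · rfl
              · simp [pvLookB, h'] at hlk
            have h2 : pvSegs [c] (d :: t'') = pvSegs ([c] ++ [d]) t'' := by
              simp [pvSegs, hdup]
            rcases pv_segs_head t'' ([c] ++ [d]) with ⟨s2, rest2, hsr2⟩
            rw [h2, hsr2] at hsr'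
            have h1 := (List.cons_eq_cons.mp hsr').1
            simp only [List.cons_append, List.nil_append, List.cons.injEq] at h1
            have hs : s = d :: s2 := h1.2.symm
            subst hs
            simp
      rw [hsr',
        show pvMergeL (cur :: (c :: s) :: rest) = pvMergeA cur ((c :: s) :: rest) [] from rfl,
        pv_mergeA_cons_false cur (c :: s) rest hcond]
      rfl

lemma pv_part_eq (p : List Char) (h : '_' ∉ p) : pvTokB [] p = pvPartA [] p := by
  cases p with
  | nil => simp [pvTokB, pvPartA]
  | cons c t =>
    simp only [List.mem_cons, not_or] at h
    have hc : (c == '_') = false := pv_bne c h.1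
    have hsplit : PySem.Chars.splitOn (c :: pvLowerA c t) ['_'] = pvSegs [c] t := by
      rw [pv_splitOn_eq]
      simp only [pvParts, hc, Bool.false_eq_true, if_false, List.nil_append]
      exact pv_lowerA_parts t c [c] h.2 hc
    rcases pv_segs_head t [c] with ⟨s, rest, hsr⟩
    simp only [pvPartA, hsplit, hsr]
    have hB : pvTokB [] (c :: t) = pvTokB [c] t := by
      simp [pvTokB]
    rw [hB, pv_tokB_merge t [c] (by simp) h.2, hsr]
    rfl

lemma pv_runB_part (p : List Char) :
    ∀ cur, '_' ∉ p → pvRunB [] cur p = pvTokB cur p := by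
  induction p with
  | nil => intro cur _; simp [pvRunB, pvTokB]
  | cons c p' ih =>
    intro cur h
    simp only [List.mem_cons, not_or] at h
    have hc : (c == '_') = false := pv_bne c h.1
    simp only [pvRunB, pvTokB, hc, Bool.false_eq_true, if_false]
    split_ifs with h1 h2
    · exact ih _ h.2
    · rw [pv_runB_acc p' ([] ++ [cur]) [c], ih [c] h.2]; simp
    · exact ih _ h.2

lemma pv_runB_split (p : List Char) :
    ∀ cur t, '_' ∉ p →
      pvRunB [] cur (p ++ '_' :: t) = pvTokB cur p ++ pvRunB [] [] t := by
  induction p with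
  | nil =>
    intro cur t _
    rw [List.nil_append]
    have h1 : pvRunB [] cur ('_' :: t) = pvRunB [cur] [] t := by simp [pvRunB]
    rw [h1, pv_runB_acc t [cur] []]
    rfl
  | cons c p' ih =>
    intro cur t h
    simp only [List.mem_cons, not_or] at h
    have hc : (c == '_') = false := pv_bne c h.1
    simp only [List.cons_append, pvRunB, pvTokB, hc, Bool.false_eq_true, if_false,
      pv_lookB_append]
    split_ifs with h1 h2
    · exact ih _ t h.2
    · rw [pv_runB_acc (p' ++ '_' :: t) ([] ++ [cur]) [c], ih [c] t h.2]; simp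
    · exact ih _ t h.2

lemma pv_decomp (L : List Char) :
    '_' ∉ L ∨ ∃ p t, L = p ++ '_' :: t ∧ '_' ∉ p := by
  induction L with
  | nil => exact Or.inl (by simp)
  | cons c t ih =>
    by_cases hc : c = '_'
    · exact Or.inr ⟨[], t, by simp [hc], by simp⟩
    · rcases ih with h | ⟨p, t', h1, h2⟩
      · exact Or.inl (by simp [h]; exact fun hh => hc hh.symm)
      · exact Or.inr ⟨c :: p, t', by simp [h1], by simp [h2]; exact fun hh => hc hh.symm⟩

lemma pv_main : ∀ (n : Nat) (L : List Char), L.length ≤ n →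
    pvRunB [] [] L = (pvParts [] L).flatMap (pvPartA []) := by
  intro n
  induction n with
  | zero =>
    intro L hL
    have : L = [] := List.length_eq_zero_iff.mp (Nat.le_zero.mp hL)
    subst this
    simp [pvRunB, pvParts, pvPartA]
  | succ n ih =>
    intro L hL
    rcases pv_decomp L with h | ⟨p, t, heq, hp⟩
    · rw [pv_runB_part L [] h, pv_part_eq L h, pv_parts_no_us L [] h]
      simp
    · subst heq
      have ht : t.length ≤ n := by simp at hL; omega
      rw [pv_runB_split p [] t hp, pv_part_eq p hp, pv_parts_split p [] t hp, ih t ht,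
        List.flatMap_cons]
      simp

-- ===== VERDICT (by name: the statement is the Claim_ definition above) =====
theorem tokenize_name_spec : Claim_equal_tokenize_name := by
  intro fullname _
  unfold Spec_tokenize_name tokenize_name tokenize_name_alt
  rw [pv_splitOn_eq, pv_foldl_partA, pv_main (fullname.toList.length) _ le_rfl]
  rfl
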